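-- pv_equiv track=rewrite | github.com/ananyamukh6/Insurance_data_analysis | utils.py | convert_categorical_datacols
-- ===== SOURCE A (Python) =====
-- def convert_categorical_datacols(data, colname):
--     category_map = {}
--     ctr = 0
--     for item in data[colname]:
--         if item not in category_map:
--             category_map[item] = ctr
--             ctr += 1
--     return category_map
-- ===== SOURCE B (Python) =====
-- def convert_categorical_datacols(data, colname):
--     col = data[colname]
--     ordered = sorted(set(col), key=col.index)
--     return dict(zip(ordered, range(len(ordered))))
-- ===== Notes on version B (the rewrite author's own statement) =====
-- stated objective: alternative
-- what changed: Instead of one pass with a membership guard and a running counter, B builds the unordered set of distinct values, sorts it by each value's first index in the column (list.index), and zips the sorted values with range to form the dict.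
import Mathlib
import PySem

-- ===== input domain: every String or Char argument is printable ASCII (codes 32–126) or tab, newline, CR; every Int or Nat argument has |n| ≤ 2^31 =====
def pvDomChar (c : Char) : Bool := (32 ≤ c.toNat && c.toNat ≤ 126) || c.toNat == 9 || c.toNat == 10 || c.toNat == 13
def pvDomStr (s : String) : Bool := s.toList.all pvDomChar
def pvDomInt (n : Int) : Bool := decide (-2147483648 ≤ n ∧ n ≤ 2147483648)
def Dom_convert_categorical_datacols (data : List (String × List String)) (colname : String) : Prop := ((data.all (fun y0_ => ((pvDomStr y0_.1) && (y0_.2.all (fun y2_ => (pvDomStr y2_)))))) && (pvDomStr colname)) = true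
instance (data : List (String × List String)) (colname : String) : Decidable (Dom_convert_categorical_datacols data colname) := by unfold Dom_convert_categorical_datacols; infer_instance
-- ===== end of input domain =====

-- B replaces A's single pass with a membership guard and a running counter by a different
-- algorithm: build the unordered set of distinct values, sort it by each value's first index
-- in the column (list.index), and zip the sorted values with range; objective: alternative.

-- ===== PORT A =====
-- data[colname] (KeyError when absent → none here; excluded by Pre_); then the guarded
-- counting loop, step for step, over the state (category_map, ctr).
def convert_categorical_datacols (data : List (String × List String)) (colname : String) : List (String × Int) :=
  match (PySem.Dict.mk data).get? colname with
  | none => []   -- Python raises KeyError here; outside Pre_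
  | some col =>
    (col.foldl
      (fun (st : PySem.Dict String Int × Int) item =>
        if st.1.contains item then st else (st.1.insert item st.2, st.2 + 1))
      (PySem.Dict.empty, 0)).1.items

-- ===== PORT B =====
-- col = data[colname]; ordered = sorted(set(col), key=col.index); dict(zip(ordered, range(len(ordered)))).
-- col.index(v) is ported as (index? col v).getD 0 — exact here, since every v ∈ set(col) is in col.
def convert_categorical_datacols_alt (data : List (String × List String)) (colname : String) : List (String × Int) :=
  match (PySem.Dict.mk data).get? colname with
  | none => []   -- Python raises KeyError here; outside Pre_
  | some col =>
    let ordered := PySem.List.sorted (PySem.Set.ofList col)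
      (fun v => (PySem.List.index? col v).getD 0)
    (PySem.Dict.ofList (ordered.zip (PySem.List.pyRange 0 (ordered.length : Int) 1))).items

-- ===== PRECONDITION & SPEC =====
-- Pre_ excludes exactly the inputs where data[colname] raises KeyError (colname not a key).
def Pre_convert_categorical_datacols (data : List (String × List String)) (colname : String) : Prop :=
  colname ∈ data.map Prod.fst
instance (data : List (String × List String)) (colname : String) : Decidable (Pre_convert_categorical_datacols data colname) := by unfold Pre_convert_categorical_datacols; infer_instance

def pvWitness_convert_categorical_datacols : (List (String × List String)) × String :=
  ([("c", ["x", "y", "x", "z", "y"]), ("d", ["a"])], "c")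

def Spec_convert_categorical_datacols (data : List (String × List String)) (colname : String) (out : List (String × Int)) : Prop := out = convert_categorical_datacols_alt data colname
instance (data : List (String × List String)) (colname : String) (out : List (String × Int)) : Decidable (Spec_convert_categorical_datacols data colname out) := by unfold Spec_convert_categorical_datacols; infer_instance

-- ===== CLAIM (what is proved, stated in full; the proofs are below) =====
def Claim_equal_convert_categorical_datacols : Prop := ∀ (data : List (String × List String)) (colname : String), Dom_convert_categorical_datacols data colname → Pre_convert_categorical_datacols data colname → Spec_convert_categorical_datacols data colname (convert_categorical_datacols data colname)

-- ===== LEMMAS AND PROOFS =====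

-- the dict that A builds over a (deduplicated prefix of the) column
def pvMkD (l : List String) : PySem.Dict String Int :=
  PySem.Dict.mk ((PySem.List.enumerate l 0).map (fun p => (p.2, p.1)))

theorem pvMkD_keys (l : List String) : (pvMkD l).items.map Prod.fst = l := by
  simp [pvMkD, Function.comp_def, PySem.List.map_snd_enumerate]

theorem pvMkD_mem (l : List String) (x : String) :
    (pvMkD l).contains x = true ↔ x ∈ l := by
  simp only [PySem.Dict.contains, List.any_eq_true, beq_iff_eq]
  constructor
  · rintro ⟨p, hp, rfl⟩
    rw [← pvMkD_keys l]
    exact List.mem_map_of_mem hp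
  · intro hx
    rw [← pvMkD_keys l] at hx
    rcases List.mem_map.mp hx with ⟨p, hp, he⟩
    exact ⟨p, hp, he⟩

theorem pvMkD_append (l : List String) (x : String) (hx : x ∉ l) :
    (pvMkD l).insert x (l.length : Int) = pvMkD (l ++ [x]) := by
  have hc : (pvMkD l).contains x = false := by
    rw [Bool.eq_false_iff]
    intro htrue
    exact hx ((pvMkD_mem l x).mp htrue)
  simp only [PySem.Dict.insert, hc, Bool.false_eq_true, if_false]
  simp [pvMkD, PySem.List.enumerate_append, PySem.List.enumerate_cons, PySem.List.enumerate_nil]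

-- A's loop, started at the state encoding an already-seen list s, lands at the state
-- encoding the fold of PySem.Set.add over the rest.
theorem pvLoopA (col : List String) : ∀ (s : List String),
    col.foldl
      (fun (st : PySem.Dict String Int × Int) item =>
        if st.1.contains item then st else (st.1.insert item st.2, st.2 + 1))
      (pvMkD s, (s.length : Int))
    = (pvMkD (col.foldl PySem.Set.add s), ((col.foldl PySem.Set.add s).length : Int)) := by
  induction col with
  | nil => intro s; simp
  | cons x xs ih =>
    intro s
    simp only [List.foldl_cons]
    by_cases hm : x ∈ s
    · have hc : (pvMkD s).contains x = true := (pvMkD_mem s x).mpr hm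
      have ha : PySem.Set.add s x = s := by
        simp [PySem.Set.add, PySem.Set.contains, hm]
      rw [hc, if_pos rfl, ha, ih s]
    · have hc : (pvMkD s).contains x = false := by
        rw [Bool.eq_false_iff]
        intro htrue
        exact hm ((pvMkD_mem s x).mp htrue)
      have ha : PySem.Set.add s x = s ++ [x] := by
        simp [PySem.Set.add, PySem.Set.contains, hm]
      rw [hc, ha]
      simp only [Bool.false_eq_true, if_false]
      rw [pvMkD_append s x hm]
      have hlen : (s.length : Int) + 1 = (((s ++ [x]).length : Nat) : Int) := by
        simp
      rw [hlen, ih (s ++ [x])]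

-- the first-occurrence index of each value strictly increases along dict.fromkeys order,
-- so sorting set(col) by col.index recovers exactly that order
theorem pvDedupPairwise (col : List String) :
    (PySem.List.dedup col).Pairwise
      (fun a b => (PySem.List.index? col a).getD 0 < (PySem.List.index? col b).getD 0) := by
  induction col using List.reverseRecOn with
  | nil => simp
  | append_singleton xs x ih =>
    have hd : PySem.List.dedup (xs ++ [x]) = PySem.Set.add (PySem.List.dedup xs) x := by
      simp [PySem.List.dedup_eq_ofList, PySem.Set.ofList_append_singleton]
    have htrans : ∀ a ∈ PySem.List.dedup xs,
        PySem.List.index? (xs ++ [x]) a = PySem.List.index? xs a := fun a ha =>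
      PySem.List.index?_append_of_mem [x] ((PySem.List.mem_dedup _ _).mp ha)
    by_cases hx : x ∈ xs
    · have ha : PySem.Set.add (PySem.List.dedup xs) x = PySem.List.dedup xs := by
        simp [PySem.Set.add, PySem.Set.contains, hx]
      rw [hd, ha]
      refine ih.imp_of_mem ?_
      intro a b hma hmb h
      rw [htrans a hma, htrans b hmb]
      exact h
    · have ha : PySem.Set.add (PySem.List.dedup xs) x = PySem.List.dedup xs ++ [x] := by
        simp [PySem.Set.add, PySem.Set.contains, hx]
      rw [hd, ha]
      rw [List.pairwise_append]
      refine ⟨?_, by simp, ?_⟩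
      · refine ih.imp_of_mem ?_
        intro a b hma hmb h
        rw [htrans a hma, htrans b hmb]
        exact h
      · intro a hma b hmb
        rw [List.mem_singleton] at hmb
        subst hmb
        rw [htrans a hma, PySem.List.index?_append_singleton_self xs b hx]
        have haxs : a ∈ xs := (PySem.List.mem_dedup _ _).mp hma
        have hsome : (PySem.List.index? xs a).isSome :=
          (PySem.List.index?_isSome_iff _ _).mpr haxs
        rcases Option.isSome_iff_exists.mp hsome with ⟨k, hk⟩
        rcases PySem.List.getElem_of_index?_eq_some hk with ⟨hklt, _, _⟩
        rw [hk]
        simpa using hklt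

-- zipping a list with range(len) is the swapped enumerate
theorem pvEnumSwap (l : List String) : ∀ (s : Nat),
    (PySem.List.enumerate l (s : Int)).map (fun p => (p.2, p.1))
    = l.zip (PySem.List.pyRange (s : Int) ((s : Int) + l.length) 1) := by
  induction l with
  | nil => intro s; simp [PySem.List.enumerate_nil]
  | cons x xs ih =>
    intro s
    rw [PySem.List.enumerate_cons]
    have hlt : (s : Int) < (s : Int) + ((x :: xs).length : Int) := by
      simp only [List.length_cons]
      push_cast
      omega
    rw [PySem.List.pyRange_one_cons hlt]
    simp only [List.map_cons, List.zip_cons_cons]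
    have h := ih (s + 1)
    have harg : ((s + 1 : Nat) : Int) = (s : Int) + 1 := by push_cast; ring
    rw [harg] at h
    have hstop : (s : Int) + 1 + (xs.length : Int) = (s : Int) + ((x :: xs).length : Int) := by
      simp only [List.length_cons]
      push_cast
      ring
    rw [hstop] at h
    rw [h]

-- B's dict(pairs) over pairwise-distinct fresh keys just appends them.
theorem pvLoopB (ps : List (String × Int)) : ∀ (d : PySem.Dict String Int),
    (d.items.map Prod.fst ++ ps.map Prod.fst).Nodup →
    ps.foldl (fun (d : PySem.Dict String Int) p => d.insert p.1 p.2) d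
      = PySem.Dict.mk (d.items ++ ps) := by
  induction ps with
  | nil => intro d _; simp
  | cons p t ih =>
    intro d hnd
    simp only [List.foldl_cons]
    have hp1 : p.1 ∉ d.items.map Prod.fst := by
      intro hmem
      rcases List.nodup_append.mp hnd with ⟨_, _, hdisj⟩
      exact hdisj p.1 hmem p.1 (by simp) rfl
    have hc : d.contains p.1 = false := by
      rw [Bool.eq_false_iff]
      intro htrue
      simp only [PySem.Dict.contains, List.any_eq_true] at htrue
      rcases htrue with ⟨q, hq, hbe⟩
      exact hp1 (List.mem_map.mpr ⟨q, hq, beq_iff_eq.mp hbe⟩)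
    have hins : d.insert p.1 p.2 = PySem.Dict.mk (d.items ++ [p]) := by
      simp [PySem.Dict.insert, hc]
    rw [hins]
    have := ih (PySem.Dict.mk (d.items ++ [p]))
      (by simpa [List.append_assoc] using hnd)
    simpa [List.append_assoc] using this

theorem pvBodies (col : List String) :
    (col.foldl
      (fun (st : PySem.Dict String Int × Int) item =>
        if st.1.contains item then st else (st.1.insert item st.2, st.2 + 1))
      (PySem.Dict.empty, 0)).1.items
    = (let ordered := PySem.List.sorted (PySem.Set.ofList col)
          (fun v => (PySem.List.index? col v).getD 0)
       (PySem.Dict.ofList (ordered.zip (PySem.List.pyRange 0 (ordered.length : Int) 1))).items) := by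
  -- A side: the guarded counting loop builds the dict over dedup col
  have h1 : (col.foldl
      (fun (st : PySem.Dict String Int × Int) item =>
        if st.1.contains item then st else (st.1.insert item st.2, st.2 + 1))
      (PySem.Dict.empty, 0))
      = (pvMkD (PySem.List.dedup col), ((PySem.List.dedup col).length : Int)) :=
    pvLoopA col []
  rw [h1]
  -- B side: sorting set(col) by first index recovers dict.fromkeys order
  have hord : PySem.List.sorted (PySem.Set.ofList col)
      (fun v => (PySem.List.index? col v).getD 0) = PySem.List.dedup col := by
    refine PySem.List.sorted_eq_of_perm_of_pairwise_lt _ _ _ ?_ (pvDedupPairwise col)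
    rw [PySem.List.dedup_eq_ofList]
  simp only [hord]
  -- the zipped pairs are the swapped enumerate pairs
  have hzip : (PySem.List.dedup col).zip
      (PySem.List.pyRange 0 (((PySem.List.dedup col).length : Nat) : Int) 1)
      = (PySem.List.enumerate (PySem.List.dedup col) 0).map (fun p => (p.2, p.1)) := by
    have h := pvEnumSwap (PySem.List.dedup col) 0
    simpa using h.symm
  rw [hzip]
  -- dict(pairs) over fresh distinct keys appends them all
  have hkeys : ((PySem.List.enumerate (PySem.List.dedup col) 0).map (fun p => (p.2, p.1))).map
      Prod.fst = PySem.List.dedup col := by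
    simp [Function.comp_def, PySem.List.map_snd_enumerate]
  have hnd : ((PySem.Dict.empty : PySem.Dict String Int).items.map Prod.fst ++
      ((PySem.List.enumerate (PySem.List.dedup col) 0).map (fun p => (p.2, p.1))).map Prod.fst).Nodup := by
    rw [hkeys]
    exact PySem.List.nodup_dedup col
  have hfold := pvLoopB ((PySem.List.enumerate (PySem.List.dedup col) 0).map (fun p => (p.2, p.1)))
    PySem.Dict.empty hnd
  show (pvMkD (PySem.List.dedup col)).items = (((PySem.List.enumerate (PySem.List.dedup col) 0).map
      (fun p => (p.2, p.1))).foldl (fun (d : PySem.Dict String Int) p => d.insert p.1 p.2)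
      PySem.Dict.empty).items
  rw [hfold]
  simp [pvMkD, PySem.Dict.empty]

-- ===== VERDICT (by name: the statement is the Claim_ definition above) =====
theorem convert_categorical_datacols_spec : Claim_equal_convert_categorical_datacols := by
  intro data colname _ _
  unfold Spec_convert_categorical_datacols convert_categorical_datacols convert_categorical_datacols_alt
  cases h : (PySem.Dict.mk data).get? colname with
  | none => rfl
  | some col => exact pvBodies col
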